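-- pv_equiv track=rewrite | github.com/Ayush-Aditya-444/Python_Public | Merge Similar Items (LeetCode).py | mergeSimilarItems
-- ===== SOURCE A (Python) =====
-- from typing import List
--
-- def mergeSimilarItems(items1: List[List[int]], items2: List[List[int]]) -> List[List[int]]:
--     list1=items1+items2
--     list2=[]
--     dict1={}
--     for i in range(len(list1)):
--         if list1[i][0] in dict1:
--             dict1[list1[i][0]]+=list1[i][1]
--         else:
--             dict1[list1[i][0]]=list1[i][1]
--     for key,values in dict1.items():
--         list2.append([key,values])
--     return sorted(list2)
-- ===== SOURCE B (Python) =====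
-- def mergeSimilarItems(items1, items2):
--     merged = sorted(items1 + items2)
--     res = []
--     for it in merged:
--         if res and res[-1][0] == it[0]:
--             res[-1][1] += it[1]
--         else:
--             res.append([it[0], it[1]])
--     return res
-- ===== Notes on version B (the rewrite author's own statement) =====
-- stated objective: alternative
-- what changed: Replaces the dict-based aggregation followed by a final sort of the [key, sum] pairs with a single sort of the concatenated input followed by one linear pass that merges adjacent runs of equal keys.
import Mathlib
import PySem

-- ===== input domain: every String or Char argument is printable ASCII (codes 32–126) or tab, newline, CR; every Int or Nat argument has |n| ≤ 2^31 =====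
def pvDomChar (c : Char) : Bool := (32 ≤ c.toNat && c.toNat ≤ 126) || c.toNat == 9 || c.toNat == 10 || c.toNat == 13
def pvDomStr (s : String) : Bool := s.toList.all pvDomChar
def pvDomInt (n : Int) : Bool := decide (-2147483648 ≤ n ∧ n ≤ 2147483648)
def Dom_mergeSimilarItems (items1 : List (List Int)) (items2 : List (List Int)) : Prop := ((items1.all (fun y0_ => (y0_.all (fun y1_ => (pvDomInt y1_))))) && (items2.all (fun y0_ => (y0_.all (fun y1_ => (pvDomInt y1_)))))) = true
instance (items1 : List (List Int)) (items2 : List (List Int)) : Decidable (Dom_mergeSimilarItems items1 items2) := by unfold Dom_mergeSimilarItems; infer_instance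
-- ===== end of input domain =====

-- B replaces A's dict aggregation + final sort of the [key, sum] pairs by one sort of the
-- concatenated input followed by a single linear pass merging adjacent runs of equal keys
-- (objective: alternative decomposition; return value only — neither program mutates its arguments).

-- ===== PORT A =====
-- loop body of A's first for-loop: if list1[i][0] in dict1: dict1[...] += ... else: dict1[...] = ...
def aStep (dict1 : PySem.Dict Int Int) (it : List Int) : PySem.Dict Int Int :=
  if dict1.contains (PySem.List.pyGetD it 0 0) then
    dict1.modify (PySem.List.pyGetD it 0 0) 0 (fun v => v + PySem.List.pyGetD it 1 0)
  else
    dict1.insert (PySem.List.pyGetD it 0 0) (PySem.List.pyGetD it 1 0)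

def mergeSimilarItems (items1 : List (List Int)) (items2 : List (List Int)) : List (List Int) :=
  let list1 := items1 ++ items2
  let dict1 := (PySem.List.pyRange 0 ↑list1.length).foldl
    (fun dict1 i => aStep dict1 (PySem.List.pyGetD list1 i [])) PySem.Dict.empty
  let list2 := dict1.items.foldl (fun list2 kv => list2 ++ [[kv.1, kv.2]]) []
  PySem.List.sorted list2 (fun x => x)

-- ===== PORT B =====
-- loop body of B: if res and res[-1][0] == it[0]: res[-1][1] += it[1] else: res.append([it[0], it[1]])
def bStep (res : List (List Int)) (it : List Int) : List (List Int) :=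
  if res ≠ [] ∧ PySem.List.pyGetD (PySem.List.pyGetD res (-1) []) 0 0 = PySem.List.pyGetD it 0 0 then
    res.dropLast ++ [[PySem.List.pyGetD (PySem.List.pyGetD res (-1) []) 0 0,
                      PySem.List.pyGetD (PySem.List.pyGetD res (-1) []) 1 0 + PySem.List.pyGetD it 1 0]]
  else
    res ++ [[PySem.List.pyGetD it 0 0, PySem.List.pyGetD it 1 0]]

def mergeSimilarItems_alt (items1 : List (List Int)) (items2 : List (List Int)) : List (List Int) :=
  let merged := PySem.List.sorted (items1 ++ items2) (fun x => x)
  merged.foldl bStep []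

-- ===== PRECONDITION & SPEC =====
-- Pre_ excludes exactly the inputs on which A raises IndexError: some item with fewer than
-- two entries (A reads item[0] and item[1]; B reads the same entries and raises there too).
def Pre_mergeSimilarItems (items1 : List (List Int)) (items2 : List (List Int)) : Prop :=
  ∀ it ∈ items1 ++ items2, 2 ≤ it.length
instance (items1 : List (List Int)) (items2 : List (List Int)) : Decidable (Pre_mergeSimilarItems items1 items2) := by unfold Pre_mergeSimilarItems; infer_instance

def pvWitness_mergeSimilarItems : List (List Int) × List (List Int) := ([[1, 2], [1, 3]], [[2, 5]])

def Spec_mergeSimilarItems (items1 : List (List Int)) (items2 : List (List Int)) (out : List (List Int)) : Prop := out = mergeSimilarItems_alt items1 items2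
instance (items1 : List (List Int)) (items2 : List (List Int)) (out : List (List Int)) : Decidable (Spec_mergeSimilarItems items1 items2 out) := by unfold Spec_mergeSimilarItems; infer_instance

-- ===== CLAIM (what is proved, stated in full; the proofs are below) =====
def Claim_equal_mergeSimilarItems : Prop := ∀ (items1 : List (List Int)) (items2 : List (List Int)), Dom_mergeSimilarItems items1 items2 → Pre_mergeSimilarItems items1 items2 → Spec_mergeSimilarItems items1 items2 (mergeSimilarItems items1 items2)

-- ===== LEMMAS AND PROOFS =====

-- proof-only vocabulary: the key/value an item contributes, and the total value per key
def keyOf (it : List Int) : Int := PySem.List.pyGetD it 0 0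
def valOf (it : List Int) : Int := PySem.List.pyGetD it 1 0
def sumFor (l : List (List Int)) (k : Int) : Int :=
  (l.map (fun it => if keyOf it = k then valOf it else 0)).sum
-- the run structure B's scan builds: current run (k, s), then the remaining items
def groupRuns (k s : Int) : List (List Int) → List (List Int)
  | [] => [[k, s]]
  | it :: rest =>
    if keyOf it = k then groupRuns k (s + valOf it) rest
    else [k, s] :: groupRuns (keyOf it) (valOf it) rest

lemma aStep_def (d : PySem.Dict Int Int) (it : List Int) :
    aStep d it = if d.contains (keyOf it) then d.modify (keyOf it) 0 (fun v => v + valOf it)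
                 else d.insert (keyOf it) (valOf it) := rfl

-- the ports elaborate `sorted` with core's List LT instance; the PySem order lemmas use the
-- (definitionally equal) LinearOrder instance — bridge once
lemma sorted_inst (xs : List (List Int)) :
    PySem.List.sorted xs (fun x => x) =
      @PySem.List.sorted (List ℤ) (List ℤ) List.instLinearOrder.toLT LinearOrder.toDecidableLT xs (fun x => x) false := by
  congr 1

lemma sortedP_pairwise (xs : List (List Int)) :
    (PySem.List.sorted xs (fun x => x)).Pairwise (fun a b => a ≤ b) := by
  have h := PySem.List.sorted_pairwise (κ := List ℤ) xs (fun x => x)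
  rw [← sorted_inst] at h
  exact h

lemma sortedP_eq (xs ys : List (List Int)) (h : ys.Perm xs) (hp : ys.Pairwise (fun a b => a < b)) :
    PySem.List.sorted xs (fun x => x) = ys := by
  have h2 := PySem.List.sorted_eq_of_perm_of_pairwise_lt (κ := List ℤ) xs ys (fun x => x) h ?_
  · rw [← sorted_inst] at h2; exact h2
  · exact hp

lemma sumFor_nil (k : Int) : sumFor [] k = 0 := rfl

lemma sumFor_cons (it : List Int) (l : List (List Int)) (k : Int) :
    sumFor (it :: l) k = (if keyOf it = k then valOf it else 0) + sumFor l k := by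
  simp [sumFor]

lemma sumFor_eq_zero (l : List (List Int)) (k : Int) (h : ∀ it ∈ l, keyOf it ≠ k) :
    sumFor l k = 0 := by
  induction l with
  | nil => rfl
  | cons it t ih =>
    rw [sumFor_cons, if_neg (h it (by simp)), ih (fun x hx => h x (by simp [hx])), zero_add]

lemma sumFor_perm {m l : List (List Int)} (h : m.Perm l) (k : Int) : sumFor m k = sumFor l k :=
  List.Perm.sum_eq (h.map _)

lemma pair_lt {k1 k2 a b : Int} (h : k1 < k2) : ([k1, a] : List Int) < [k2, b] :=
  (List.lt_iff_lex_lt _ _).mpr (List.Lex.rel h)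

lemma keyOf_mono {a b : List Int} (ha : a ≠ []) (hb : b ≠ []) (h : a ≤ b) : keyOf a ≤ keyOf b := by
  rcases a with _ | ⟨x, xs⟩; · exact absurd rfl ha
  rcases b with _ | ⟨y, ys⟩; · exact absurd rfl hb
  simp only [keyOf, PySem.List.pyGetD_zero_cons]
  by_contra hlt
  exact absurd h (not_le.mpr ((List.lt_iff_lex_lt _ _).mpr (List.Lex.rel (not_le.mp hlt))))

-- Set.ofList of a list is a sublist of the list (first occurrences, in order)
lemma foldl_add_sublist {α : Type} [BEq α] [LawfulBEq α] (t : List α) :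
    ∀ s : List α, List.Sublist (t.foldl PySem.Set.add s) (s ++ t) := by
  induction t with
  | nil => intro s; simp
  | cons a t ih =>
    intro s
    refine (ih (PySem.Set.add s a)).trans ?_
    by_cases hmem : a ∈ s
    · simp only [PySem.Set.add, PySem.Set.contains, List.contains_iff_mem.mpr hmem, if_pos]
      exact (List.sublist_cons_self a t).append_left s
    · have : PySem.Set.add s a = s ++ [a] := by
        simp [PySem.Set.add, PySem.Set.contains, hmem]
      rw [this, List.append_assoc]
      simp

lemma ofList_sublist {α : Type} [BEq α] [LawfulBEq α] (xs : List α) :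
    List.Sublist (PySem.Set.ofList xs) xs := by
  have := foldl_add_sublist xs ([] : List α)
  rwa [← PySem.Set.ofList_eq_foldl, List.nil_append] at this

lemma ofList_cons_cons_self (x : Int) (xs : List Int) :
    PySem.Set.ofList (x :: x :: xs) = PySem.Set.ofList (x :: xs) := by
  simp [PySem.Set.ofList_eq_foldl, List.foldl, PySem.Set.add]

lemma ofList_cons_of_not_mem (x : Int) (xs : List Int) (h : x ∉ xs) :
    PySem.Set.ofList (x :: xs) = x :: PySem.Set.ofList xs := by
  rw [PySem.Set.ofList_cons]
  congr 1
  rw [PySem.Set.discard, List.filter_eq_self]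
  intro a ha
  have hax : a ≠ x := by
    rintro rfl
    exact h ((PySem.Set.mem_ofList xs a).mp ha)
  simp [hax]

-- ===== A-side characterisation =====
lemma getD_aFold (m : List (List Int)) :
    ∀ (d : PySem.Dict Int Int) (k : Int),
      (m.foldl aStep d).getD k 0 = d.getD k 0 + sumFor m k := by
  induction m with
  | nil => intro d k; simp [sumFor_nil]
  | cons it t ih =>
    intro d k
    rw [List.foldl_cons, ih, sumFor_cons]
    have hstep : (aStep d it).getD k 0 = d.getD k 0 + (if keyOf it = k then valOf it else 0) := by
      by_cases hc : d.contains (keyOf it) = true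
      · rw [aStep_def, if_pos hc, PySem.Dict.getD_modify]
        rcases eq_or_ne k (keyOf it) with hk | hk
        · subst hk
          simp
        · simp [hk, Ne.symm hk]
      · rw [aStep_def, if_neg hc, PySem.Dict.getD_insert]
        rcases eq_or_ne k (keyOf it) with hk | hk
        · subst hk
          rw [PySem.Dict.getD_of_not_contains d 0 (Bool.not_eq_true _ ▸ hc)]
          simp
        · simp [hk, Ne.symm hk]
    rw [hstep, add_assoc]

lemma keys_aFold (m : List (List Int)) :
    ∀ d : PySem.Dict Int Int,
      (m.foldl aStep d).keys = PySem.Set.update d.keys (m.map keyOf) := by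
  induction m with
  | nil => intro d; simp [PySem.Set.update]
  | cons it t ih =>
    intro d
    rw [List.foldl_cons, ih]
    have hstep : (aStep d it).keys = PySem.Set.add d.keys (keyOf it) := by
      rw [aStep_def]
      split_ifs with hc
      · rw [PySem.Dict.keys_modify, PySem.Dict.keys_insert_of_contains _ _ hc]
        have hmem : keyOf it ∈ d.keys := (PySem.Dict.contains_iff_mem_keys d (keyOf it)).mp hc
        simp [PySem.Set.add, PySem.Set.contains, hmem]
      · have hc' : d.contains (keyOf it) = false := Bool.not_eq_true _ ▸ hc
        rw [PySem.Dict.keys_insert_of_not_contains _ _ hc']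
        have hmem : keyOf it ∉ d.keys := fun hm =>
          hc ((PySem.Dict.contains_iff_mem_keys d (keyOf it)).mpr hm)
        simp [PySem.Set.add, PySem.Set.contains, hmem]
    rw [hstep, List.map_cons, PySem.Set.update, PySem.Set.update, List.foldl_cons]

lemma A_eq (items1 items2 : List (List Int)) :
    mergeSimilarItems items1 items2 =
      PySem.List.sorted
        ((PySem.Set.ofList ((items1 ++ items2).map keyOf)).map
          (fun k => [k, sumFor (items1 ++ items2) k])) (fun x => x) := by
  unfold mergeSimilarItems
  dsimp only
  rw [PySem.List.foldl_pyRange_zero_pyGetD']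
  congr 1
  have hkeys : ((items1 ++ items2).foldl aStep PySem.Dict.empty).keys
      = PySem.Set.ofList ((items1 ++ items2).map keyOf) := by
    rw [keys_aFold, PySem.Dict.keys_empty, PySem.Set.update, PySem.Set.ofList_eq_foldl]
  have hnd : ((items1 ++ items2).foldl aStep PySem.Dict.empty).keys.Nodup := by
    rw [hkeys]; exact PySem.Set.nodup_ofList _
  rw [PySem.List.foldl_append_singleton_eq_map, List.nil_append,
      PySem.Dict.items_eq_map_keys _ hnd 0, hkeys, List.map_map]
  apply List.map_congr_left
  intro k _
  simp only [Function.comp]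
  rw [getD_aFold, PySem.Dict.getD_empty, zero_add]

-- ===== B-side characterisation =====
lemma pyGetD_pair0 (k s : Int) : PySem.List.pyGetD [k, s] 0 0 = k :=
  PySem.List.pyGetD_zero_cons _ _ _

lemma pyGetD_pair1 (k s : Int) : PySem.List.pyGetD [k, s] 1 0 = s := by
  simp [pysem]

lemma foldl_bStep (m : List (List Int)) :
    ∀ (G : List (List Int)) (k s : Int),
      m.foldl bStep (G ++ [[k, s]]) = G ++ groupRuns k s m := by
  induction m with
  | nil => intro G k s; simp [groupRuns]
  | cons it rest ih =>
    intro G k s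
    rw [List.foldl_cons]
    have hlast : PySem.List.pyGetD (G ++ [[k, s]]) (-1) ([] : List Int) = [k, s] :=
      PySem.List.pyGetD_neg_one_append_singleton _ _ _
    have hne : (G ++ [[k, s]] : List (List Int)) ≠ [] := by simp
    by_cases hk : keyOf it = k
    · have hk' : PySem.List.pyGetD it 0 0 = k := hk
      have hstep : bStep (G ++ [[k, s]]) it = G ++ [[k, s + valOf it]] := by
        unfold bStep
        rw [hlast, pyGetD_pair0, pyGetD_pair1, if_pos ⟨hne, hk'.symm⟩, List.dropLast_concat]
        rfl
      rw [hstep, ih, groupRuns, if_pos hk]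
    · have hk' : PySem.List.pyGetD it 0 0 ≠ k := hk
      have hstep : bStep (G ++ [[k, s]]) it = (G ++ [[k, s]]) ++ [[keyOf it, valOf it]] := by
        unfold bStep
        rw [hlast, pyGetD_pair0]
        rw [if_neg (by rintro ⟨-, hEq⟩; exact hk' hEq.symm)]
        rfl
      rw [hstep, ih, groupRuns, if_neg hk, List.append_assoc]
      rfl

lemma groupRuns_eq (m : List (List Int)) :
    ∀ (k s : Int), (∀ it ∈ m, k ≤ keyOf it) → ((m.map keyOf).Pairwise (· ≤ ·)) →
      groupRuns k s m =
        (PySem.Set.ofList (k :: m.map keyOf)).map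
          (fun j => [j, (if j = k then s else 0) + sumFor m j]) := by
  induction m with
  | nil =>
    intro k s _ _
    simp [groupRuns, PySem.Set.ofList_eq_foldl, PySem.Set.add, sumFor_nil]
  | cons it rest ih =>
    intro k s hlb hmono
    rw [List.map_cons] at hmono ⊢
    have hrest_lb : ∀ x ∈ rest, keyOf it ≤ keyOf x := by
      intro x hx
      exact (List.pairwise_cons.mp hmono).1 (keyOf x) (List.mem_map_of_mem hx)
    have hmono' : (rest.map keyOf).Pairwise (· ≤ ·) := (List.pairwise_cons.mp hmono).2
    by_cases hk : keyOf it = k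
    · rw [groupRuns, if_pos hk, ih k (s + valOf it) (fun x hx => hk ▸ hrest_lb x hx) hmono',
          hk, ofList_cons_cons_self]
      apply List.map_congr_left
      intro j _
      rcases eq_or_ne j k with hj | hj
      · subst hj
        rw [sumFor_cons, hk, if_pos rfl, if_pos rfl, if_pos rfl]
        ring_nf
      · rw [sumFor_cons, hk, if_neg hj, if_neg hj, if_neg (fun h => hj h.symm)]
        ring_nf
    · have hklt : k < keyOf it := lt_of_le_of_ne (hlb it (by simp)) (fun h => hk h.symm)
      have hnotmem : k ∉ keyOf it :: rest.map keyOf := by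
        intro hm
        rcases List.mem_cons.mp hm with h | h
        · exact hklt.ne' h.symm
        · rcases List.mem_map.mp h with ⟨x, hx, hxk⟩
          exact (lt_of_lt_of_le hklt (hrest_lb x hx)).ne' hxk
      rw [groupRuns, if_neg hk, ih (keyOf it) (valOf it) hrest_lb hmono',
          ofList_cons_of_not_mem _ _ hnotmem, List.map_cons]
      congr 1
      · rw [if_pos rfl]
        have hz : sumFor (it :: rest) k = 0 := by
          apply sumFor_eq_zero
          intro x hx
          rcases List.mem_cons.mp hx with h | h
          · exact h ▸ hklt.ne'
          · exact (lt_of_lt_of_le hklt (hrest_lb x h)).ne'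
        rw [hz, add_zero]
      · apply List.map_congr_left
        intro j hj
        have hjmem : j ∈ keyOf it :: rest.map keyOf := (ofList_sublist _).mem hj
        have hjk : j ≠ k := fun h => hnotmem (h ▸ hjmem)
        rw [if_neg hjk, sumFor_cons]
        rcases eq_or_ne j (keyOf it) with hje | hje
        · rw [if_pos hje, if_pos hje.symm]
          ring_nf
        · rw [if_neg hje, if_neg (fun h => hje h.symm)]
          ring_nf

lemma B_eq (items1 items2 : List (List Int)) (hpre : Pre_mergeSimilarItems items1 items2) :
    mergeSimilarItems_alt items1 items2 =
      (PySem.Set.ofList ((PySem.List.sorted (items1 ++ items2) (fun x => x)).map keyOf)).map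
        (fun j => [j, sumFor (PySem.List.sorted (items1 ++ items2) (fun x => x)) j]) := by
  unfold mergeSimilarItems_alt
  dsimp only
  have hmperm : (PySem.List.sorted (items1 ++ items2) (fun x => x)).Perm (items1 ++ items2) :=
    PySem.List.sorted_perm _ _ _
  have hne : ∀ x ∈ PySem.List.sorted (items1 ++ items2) (fun x => x), x ≠ ([] : List Int) := by
    intro x hx
    have h2 := hpre x (hmperm.mem_iff.mp hx)
    rintro rfl; simp at h2
  have hmono : ((PySem.List.sorted (items1 ++ items2) (fun x => x)).map keyOf).Pairwise (· ≤ ·) := by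
    rw [List.pairwise_map]
    refine (sortedP_pairwise (items1 ++ items2)).imp_of_mem ?_
    intro a b ha hb hab
    exact keyOf_mono (hne a ha) (hne b hb) hab
  generalize hM : PySem.List.sorted (items1 ++ items2) (fun x => x) = m at *
  cases m with
  | nil => simp [PySem.Set.ofList_eq_foldl]
  | cons it rest =>
    rw [List.foldl_cons]
    have h0 : bStep [] it = [[keyOf it, valOf it]] := by
      unfold bStep
      rw [if_neg (by rintro ⟨h, -⟩; exact h rfl)]
      rfl
    have h0' : ([[keyOf it, valOf it]] : List (List Int)) = [] ++ [[keyOf it, valOf it]] := rfl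
    rw [h0, h0', foldl_bStep rest [] (keyOf it) (valOf it), List.nil_append]
    rw [List.map_cons] at hmono
    rw [groupRuns_eq rest (keyOf it) (valOf it)
        (fun x hx => (List.pairwise_cons.mp hmono).1 (keyOf x) (List.mem_map_of_mem hx))
        (List.pairwise_cons.mp hmono).2, List.map_cons]
    apply List.map_congr_left
    intro j _
    rw [sumFor_cons]
    rcases eq_or_ne j (keyOf it) with hje | hje
    · rw [if_pos hje, if_pos hje.symm]
    · rw [if_neg hje, if_neg (fun h => hje h.symm)]

-- ===== VERDICT (by name: the statement is the Claim_ definition above) =====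
theorem mergeSimilarItems_spec : Claim_equal_mergeSimilarItems := by
  intro items1 items2 _dom hpre
  unfold Spec_mergeSimilarItems
  rw [A_eq, B_eq items1 items2 hpre]
  have hmperm : (PySem.List.sorted (items1 ++ items2) (fun x => x)).Perm (items1 ++ items2) :=
    PySem.List.sorted_perm _ _ _
  have hne : ∀ x ∈ PySem.List.sorted (items1 ++ items2) (fun x => x), x ≠ ([] : List Int) := by
    intro x hx
    have h2 := hpre x (hmperm.mem_iff.mp hx)
    rintro rfl; simp at h2
  have hmono : ((PySem.List.sorted (items1 ++ items2) (fun x => x)).map keyOf).Pairwise (· ≤ ·) := by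
    rw [List.pairwise_map]
    refine (sortedP_pairwise (items1 ++ items2)).imp_of_mem ?_
    intro a b ha hb hab
    exact keyOf_mono (hne a ha) (hne b hb) hab
  have hsum : (fun j => ([j, sumFor (PySem.List.sorted (items1 ++ items2) (fun x => x)) j] : List Int))
      = (fun j => [j, sumFor (items1 ++ items2) j]) := by
    funext j
    rw [sumFor_perm hmperm]
  rw [hsum]
  apply sortedP_eq
  · apply List.Perm.map
    rw [List.perm_ext_iff_of_nodup (PySem.Set.nodup_ofList _) (PySem.Set.nodup_ofList _)]
    intro a
    rw [PySem.Set.mem_ofList, PySem.Set.mem_ofList]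
    exact (hmperm.map keyOf).mem_iff
  · rw [List.pairwise_map]
    have hle : (PySem.Set.ofList ((PySem.List.sorted (items1 ++ items2) (fun x => x)).map keyOf)).Pairwise (· ≤ ·) :=
      hmono.sublist (ofList_sublist _)
    have hnd : (PySem.Set.ofList ((PySem.List.sorted (items1 ++ items2) (fun x => x)).map keyOf)).Pairwise (· ≠ ·) :=
      PySem.Set.nodup_ofList _
    exact (hle.and hnd).imp (fun h => pair_lt (lt_of_le_of_ne h.1 h.2))
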